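-- pv_equiv track=rewrite | github.com/iks15174/study | programmers/단어퍼즐.py | solution
-- ===== SOURCE A (Python) =====
-- def solution(strs, t):
--     dp = [20002] * len(t)
--     for i in range(len(t)):
--         sub_t = t[0 : i + 1]
--         for s in strs:
--             if sub_t.endswith(s):
--                 dp[i] = min(dp[i], 1 if i - len(s) < 0 else dp[i - len(s)] + 1)
--     if dp[-1] == 20002:
--         return -1
--     else:
--         return dp[-1]
-- ===== SOURCE B (Python) =====
-- def solution(strs, t):
--     # Index the pieces: one membership set plus the distinct piece lengths,
--     # so each dp cell tries only the distinct lengths (set lookup) instead of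
--     # scanning every piece with endswith.  Empty pieces can never contribute.
--     pieces = set(strs)
--     lengths = sorted({len(s) for s in strs if s})
--     dp = []
--     for i in range(len(t)):
--         best = 20002
--         for L in lengths:
--             if L <= i + 1 and t[i + 1 - L : i + 1] in pieces:
--                 cand = 1 if L == i + 1 else dp[i - L] + 1
--                 best = min(best, cand)
--         dp.append(best)
--     return -1 if dp[-1] == 20002 else dp[-1]
-- ===== Notes on version B (the rewrite author's own statement) =====
-- stated objective: faster
-- what changed: B replaces the per-cell scan of every piece with endswith by a one-time index (a membership set of the pieces plus the sorted list of distinct piece lengths), so each dp cell tries only the distinct lengths with a slice + set lookup, and dp is built by appending instead of preallocating.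
import Mathlib
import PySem

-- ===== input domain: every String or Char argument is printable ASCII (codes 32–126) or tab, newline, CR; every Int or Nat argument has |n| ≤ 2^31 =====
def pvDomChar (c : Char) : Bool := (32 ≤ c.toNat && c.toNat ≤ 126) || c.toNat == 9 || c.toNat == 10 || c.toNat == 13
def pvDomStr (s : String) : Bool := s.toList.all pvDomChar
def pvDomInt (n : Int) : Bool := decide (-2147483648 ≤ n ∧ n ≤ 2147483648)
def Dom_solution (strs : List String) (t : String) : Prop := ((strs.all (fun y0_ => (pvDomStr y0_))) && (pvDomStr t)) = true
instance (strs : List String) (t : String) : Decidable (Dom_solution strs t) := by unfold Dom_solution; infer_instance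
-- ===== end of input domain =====

-- B indexes the pieces once (membership set + distinct piece lengths) so each dp cell
-- tries only distinct lengths via a set lookup instead of scanning every piece with endswith.


-- ===== PORT A =====
def solution (strs : List String) (t : String) : Int :=
  let dp : List Int := List.replicate (PySem.Str.len t).toNat 20002
  let dp := (PySem.List.pyRange 0 (PySem.Str.len t) 1).foldl (fun dp i =>
    let subT := PySem.Str.slice t (some 0) (some (i + 1))
    strs.foldl (fun dp s =>
      if PySem.Str.endswith subT s then
        PySem.List.pySetD dp i (min (PySem.List.pyGetD dp i 0)
          (if i - PySem.Str.len s < 0 then 1 else PySem.List.pyGetD dp (i - PySem.Str.len s) 0 + 1))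
      else dp) dp) dp
  if PySem.List.pyGetD dp (-1) 0 = 20002 then -1 else PySem.List.pyGetD dp (-1) 0

-- ===== PORT B =====
def solution_alt (strs : List String) (t : String) : Int :=
  let pieces : PySem.Set String := PySem.Set.ofList strs
  let lengths : List Int :=
    PySem.List.sorted (PySem.Set.ofList ((strs.filter (fun s => s ≠ "")).map PySem.Str.len)) (fun x => x) false
  let dp := (PySem.List.pyRange 0 (PySem.Str.len t) 1).foldl (fun dp i =>
    let best := lengths.foldl (fun best L =>
      if L ≤ i + 1 ∧ pieces.contains (PySem.Str.slice t (some (i + 1 - L)) (some (i + 1))) then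
        min best (if L = i + 1 then 1 else PySem.List.pyGetD dp (i - L) 0 + 1)
      else best) 20002
    dp ++ [best]) []
  if PySem.List.pyGetD dp (-1) 0 = 20002 then -1 else PySem.List.pyGetD dp (-1) 0

-- ===== PRECONDITION & SPEC =====
-- Pre_ excludes only the empty target string t, on which Python A (and B) raise IndexError at dp[-1].
def Pre_solution (strs : List String) (t : String) : Prop := t ≠ ""
instance (strs : List String) (t : String) : Decidable (Pre_solution strs t) := by unfold Pre_solution; infer_instance
def pvWitness_solution : List String × String := (["a", "ab"], "aab")
def Spec_solution (strs : List String) (t : String) (out : Int) : Prop := out = solution_alt strs t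
instance (strs : List String) (t : String) (out : Int) : Decidable (Spec_solution strs t out) := by unfold Spec_solution; infer_instance

-- ===== CLAIM (what is proved, stated in full; the proofs are below) =====
def Claim_equal_solution : Prop := ∀ (strs : List String) (t : String), Dom_solution strs t → Pre_solution strs t → Spec_solution strs t (solution strs t)

-- ===== LEMMAS AND PROOFS =====

-- fold of `min` over a list of candidate values
def minFold (a : Int) (l : List Int) : Int := l.foldl min a

-- the candidate values both inner loops minimise over, at dp cell k with already-computed prefix `pre`
def candsA (strs : List String) (tl : List Char) (pre : List Int) (k : Nat) : List Int :=
  (strs.filter (fun s => s.toList ≠ [] ∧ s.toList <:+ tl.take (k+1))).map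
    (fun s => if s.toList.length = k+1 then 1 else pre.getD (k - s.toList.length) 0 + 1)

-- the common dp prefix after k outer iterations
def dpPre (strs : List String) (tl : List Char) : Nat → List Int
  | 0 => []
  | k+1 => dpPre strs tl k ++ [minFold 20002 (candsA strs tl (dpPre strs tl k) k)]

theorem length_dpPre (strs : List String) (tl : List Char) (k : Nat) :
    (dpPre strs tl k).length = k := by
  induction k with
  | zero => rfl
  | succ k ih => simp [dpPre, ih]

theorem minFold_cons (a c : Int) (l : List Int) : minFold a (c :: l) = minFold (min a c) l := rfl

theorem foldl_guard_min {α : Type} (xs : List α) (P : α → Prop) [DecidablePred P]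
    (v : α → Int) (a : Int) :
    xs.foldl (fun b x => if P x then min b (v x) else b) a
      = minFold a ((xs.filter (fun x => P x)).map v) := by
  induction xs generalizing a with
  | nil => rfl
  | cons x xs ih =>
    by_cases h : P x <;> simp [h, ih, minFold_cons]

theorem minFold_le_init (a : Int) (l : List Int) : minFold a l ≤ a := by
  induction l generalizing a with
  | nil => simp [minFold]
  | cons c l ih =>
    have := ih (min a c)
    simp only [minFold_cons] at *
    exact le_trans this (min_le_left _ _)

theorem minFold_le_mem (a x : Int) (l : List Int) (hx : x ∈ l) : minFold a l ≤ x := by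
  induction l generalizing a with
  | nil => simp at hx
  | cons c l ih =>
    rcases List.mem_cons.1 hx with h | h
    · subst h
      calc minFold a (x :: l) = minFold (min a x) l := rfl
        _ ≤ min a x := minFold_le_init _ _
        _ ≤ x := min_le_right _ _
    · exact ih _ h

theorem minFold_mem_or (a : Int) (l : List Int) : minFold a l = a ∨ minFold a l ∈ l := by
  induction l generalizing a with
  | nil => left; rfl
  | cons c l ih =>
    rcases ih (min a c) with h | h
    · rcases le_total a c with hac | hac
      · left; simpa [minFold_cons, min_eq_left hac] using h
      · right; simp only [minFold_cons] at *; rw [h, min_eq_right hac]; exact List.mem_cons_self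
    · right; exact List.mem_cons_of_mem _ h

theorem minFold_congr_mem (a : Int) (l1 l2 : List Int) (h : ∀ x, x ∈ l1 ↔ x ∈ l2) :
    minFold a l1 = minFold a l2 := by
  apply le_antisymm
  · rcases minFold_mem_or a l2 with h2 | h2
    · rw [h2]; exact minFold_le_init _ _
    · exact minFold_le_mem _ _ _ ((h _).2 h2)
  · rcases minFold_mem_or a l1 with h1 | h1
    · rw [h1]; exact minFold_le_init _ _
    · exact minFold_le_mem _ _ _ ((h _).1 h1)

theorem set_mid {α : Type} (pre suf : List α) (x v : α) :
    (pre ++ x :: suf).set pre.length v = pre ++ v :: suf := by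
  induction pre with
  | nil => rfl
  | cons p pre ih => simp [ih]

theorem getD_append_left (pre rest : List Int) (m : Nat) (h : m < pre.length) :
    (pre ++ rest).getD m 0 = pre.getD m 0 := by
  simp [List.getD, List.getElem?_append_left h]

theorem getD_append_mid (pre suf : List Int) (b : Int) :
    (pre ++ b :: suf).getD pre.length 0 = b := by
  simp [List.getD]

theorem subT_toList (t : String) (k : Nat) :
    (PySem.Str.slice t (some 0) (some ((k:Int)+1))).toList = t.toList.take (k+1) := by
  rw [PySem.Str.toList_slice, PySem.Chars.slice_eq_listSlice]
  rw [show ((0:Int) = ((0:Nat):Int)) by rfl, show ((k:Int)+1) = ((k+1 : Nat) : Int) by omega]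
  rw [PySem.List.slice_natCast]; simp

theorem set_mid' {α : Type} (pre suf : List α) (x v : α) (k : Nat) (h : pre.length = k) :
    (pre ++ x :: suf).set k v = pre ++ v :: suf := by
  subst h; exact set_mid pre suf x v

theorem innerA (strs : List String) (t : String) (pre suf : List Int) (b : Int) (k : Nat)
    (hlen : pre.length = k) (hk : k < t.toList.length) :
    strs.foldl (fun dp s =>
      if PySem.Str.endswith (PySem.Str.slice t (some 0) (some ((k : Int) + 1))) s then
        PySem.List.pySetD dp (k : Int) (min (PySem.List.pyGetD dp (k : Int) 0)
          (if (k : Int) - PySem.Str.len s < 0 then 1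
           else PySem.List.pyGetD dp ((k : Int) - PySem.Str.len s) 0 + 1))
      else dp) (pre ++ b :: suf)
    = pre ++ (minFold b (candsA strs t.toList pre k)) :: suf := by
  induction strs generalizing b with
  | nil => rfl
  | cons s rest ih =>
    have hcond : (PySem.Str.endswith (PySem.Str.slice t (some 0) (some ((k : Int) + 1))) s = true)
        ↔ s.toList <:+ t.toList.take (k+1) := by
      rw [PySem.Str.endswith_eq, subT_toList, PySem.Chars.endswith_iff]
    have hgetk : PySem.List.pyGetD (pre ++ b :: suf) ((k : Nat) : Int) 0 = b := by
      rw [PySem.List.pyGetD_natCast, ← hlen, getD_append_mid]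
    simp only [List.foldl_cons]
    by_cases hew : s.toList <:+ t.toList.take (k+1)
    · rw [if_pos (hcond.2 hew)]
      by_cases hnil : s.toList = []
      · have hs : s = "" := String.toList_inj.mp (by simp [hnil])
        have hlens : PySem.Str.len s = ((0:Nat):Int) := by rw [PySem.Str.len_eq, hnil]; rfl
        have hget0 : PySem.List.pyGetD (pre ++ b :: suf) ((k : Int) - 0) 0 = b := by
          rw [show ((k:Int) - 0) = ((k:Nat):Int) by ring]; exact hgetk
        rw [hlens]
        rw [if_neg (by omega)]
        rw [hgetk]
        rw [show ((0:Nat):Int) = (0:Int) from rfl] at *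
        rw [hget0]
        have : min b (b + 1) = b := min_eq_left (by omega)
        rw [this, PySem.List.pySetD_natCast, set_mid' pre suf b b k hlen]
        rw [ih b]
        congr 2
        simp [candsA, hs]
      · have hs : s ≠ "" := fun h => hnil (by simp [h])
        have hL1 : 1 ≤ s.toList.length := List.length_pos_iff.mpr hnil
        have hLk : s.toList.length ≤ k + 1 := by
          have := hew.length_le
          rwa [List.length_take, min_eq_left (by omega)] at this
        have hlens : PySem.Str.len s = (s.toList.length : Int) := PySem.Str.len_eq s
        by_cases hLeq : s.toList.length = k + 1
        · rw [hlens, if_pos (by omega), hgetk]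
          rw [PySem.List.pySetD_natCast, set_mid' pre suf b (min b 1) k hlen]
          rw [ih (min b 1)]
          congr 2
          rw [show candsA (s :: rest) t.toList pre k
              = (if s.toList.length = k+1 then 1 else pre.getD (k - s.toList.length) 0 + 1) :: candsA rest t.toList pre k by
            simp [candsA, hs, hew]]
          rw [if_pos hLeq, minFold_cons]
        · have hLk' : s.toList.length ≤ k := by omega
          have hidx : ((k:Int) - (s.toList.length : Int)) = (((k - s.toList.length : Nat)) : Int) := by
            omega
          rw [hlens, if_neg (by omega), hgetk, hidx, PySem.List.pyGetD_natCast]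
          rw [show (pre ++ b :: suf).getD (k - s.toList.length) 0 = pre.getD (k - s.toList.length) 0 from
            getD_append_left _ _ _ (by omega)]
          rw [PySem.List.pySetD_natCast, set_mid' pre suf b (min b (pre.getD (k - s.toList.length) 0 + 1)) k hlen]
          rw [ih (min b (pre.getD (k - s.toList.length) 0 + 1))]
          congr 2
          rw [show candsA (s :: rest) t.toList pre k
              = (if s.toList.length = k+1 then 1 else pre.getD (k - s.toList.length) 0 + 1) :: candsA rest t.toList pre k by
            simp [candsA, hs, hew]]
          rw [if_neg hLeq, minFold_cons]
    · rw [if_neg (fun h => hew (hcond.1 h))]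
      rw [ih b]
      congr 2
      simp [candsA, hew]

theorem sliceLem (t : String) (k Ln : Nat) (h2 : Ln ≤ k + 1) :
    (PySem.Str.slice t (some ((k:Int) + 1 - (Ln:Int))) (some ((k:Int) + 1))).toList
      = (t.toList.take (k+1)).drop (k+1-Ln) := by
  rw [PySem.Str.toList_slice, PySem.Chars.slice_eq_listSlice]
  rw [show ((k:Int) + 1 - (Ln:Int)) = (((k+1-Ln : Nat)):Int) by omega,
      show ((k:Int) + 1) = ((k+1 : Nat) : Int) by omega]
  rw [PySem.List.slice_natCast, List.drop_take]

theorem innerB (strs : List String) (t : String) (pre : List Int) (k : Nat)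
    (_hlen : pre.length = k) (hk : k < t.toList.length) :
    (PySem.List.sorted (PySem.Set.ofList ((strs.filter (fun s => s ≠ "")).map PySem.Str.len)) (fun x => x) false).foldl
      (fun best L =>
        if L ≤ (k : Int) + 1 ∧ (PySem.Set.ofList strs).contains
              (PySem.Str.slice t (some ((k : Int) + 1 - L)) (some ((k : Int) + 1))) then
          min best (if L = (k : Int) + 1 then 1 else PySem.List.pyGetD pre ((k : Int) - L) 0 + 1)
        else best) 20002
    = minFold 20002 (candsA strs t.toList pre k) := by
  rw [foldl_guard_min _
    (fun L => L ≤ (k : Int) + 1 ∧ (PySem.Set.ofList strs).contains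
        (PySem.Str.slice t (some ((k : Int) + 1 - L)) (some ((k : Int) + 1))) = true)
    (fun L => if L = (k : Int) + 1 then 1 else PySem.List.pyGetD pre ((k : Int) - L) 0 + 1) 20002]
  apply minFold_congr_mem
  intro x
  have htake : (t.toList.take (k+1)).length = k + 1 := by
    rw [List.length_take]; omega
  constructor
  · -- B candidate → A candidate
    intro hx
    rcases List.mem_map.1 hx with ⟨L, hLf, hvx⟩
    rcases List.mem_filter.1 hLf with ⟨hLmem, hP⟩
    rw [decide_eq_true_eq] at hP
    obtain ⟨hLle, hcont⟩ := hP
    rw [PySem.List.mem_sorted, PySem.Set.mem_ofList] at hLmem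
    rcases List.mem_map.1 hLmem with ⟨s0, hs0f, hLs0⟩
    rcases List.mem_filter.1 hs0f with ⟨hs0mem, hs0ne⟩
    rw [decide_eq_true_eq] at hs0ne
    have hs0len : L = (s0.toList.length : Int) := by rw [← hLs0, PySem.Str.len_eq]
    have hL1 : 1 ≤ s0.toList.length := by
      rcases List.eq_nil_or_concat s0.toList with h | ⟨l', a, h⟩
      · exact absurd (String.toList_inj.mp (by simp [h])) hs0ne
      · rw [h]; simp
    set Ln := s0.toList.length with hLn
    have hLle' : Ln ≤ k + 1 := by omega
    -- the slice string
    set sl := PySem.Str.slice t (some ((k : Int) + 1 - L)) (some ((k : Int) + 1)) with hsl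
    have hslL : sl.toList = (t.toList.take (k+1)).drop (k+1-Ln) := by
      rw [hsl, hs0len, sliceLem t k Ln hLle']
    have hslmem : sl ∈ strs := PySem.Set.mem_ofList strs sl |>.mp (PySem.Set.contains_iff _ _ |>.mp hcont)
    have hsllen : sl.toList.length = Ln := by
      rw [hslL, List.length_drop, htake]; omega
    refine List.mem_map.2 ⟨sl, List.mem_filter.2 ⟨hslmem, ?_⟩, ?_⟩
    · rw [decide_eq_true_eq]
      constructor
      · intro h; rw [h] at hsllen; simp at hsllen; omega
      · rw [hslL]; exact List.drop_suffix _ _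
    · rw [← hvx, hsllen, hs0len]
      by_cases hcase : Ln = k + 1
      · rw [if_pos hcase, if_pos (show ((Ln:Int)) = (k:Int) + 1 by exact_mod_cast hcase)]
      · rw [if_neg hcase, if_neg (show ¬((Ln:Int)) = (k:Int) + 1 by exact_mod_cast hcase)]
        congr 1
        rw [show ((k:Int) - (Ln:Int)) = (((k - Ln : Nat)):Int) by omega,
          PySem.List.pyGetD_natCast]
  · -- A candidate → B candidate
    intro hx
    rcases List.mem_map.1 hx with ⟨s0, hs0f, hvx⟩
    rcases List.mem_filter.1 hs0f with ⟨hs0mem, hP⟩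
    rw [decide_eq_true_eq] at hP
    obtain ⟨hs0nil, hs0suf⟩ := hP
    set Ln := s0.toList.length with hLn
    have hL1 : 1 ≤ Ln := by
      rcases List.eq_nil_or_concat s0.toList with h | ⟨l', a, h⟩
      · exact absurd h hs0nil
      · rw [hLn, h]; simp
    have hLle' : Ln ≤ k + 1 := by
      have := hs0suf.length_le; rwa [htake] at this
    have hs0ne : s0 ≠ "" := fun h => hs0nil (by simp [h])
    have hdrop : s0.toList = (t.toList.take (k+1)).drop (k+1-Ln) := by
      have := List.suffix_iff_eq_drop.mp hs0suf
      rw [this, htake]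
    set sl := PySem.Str.slice t (some ((k : Int) + 1 - (Ln:Int))) (some ((k : Int) + 1)) with hsl
    have hsleq : sl = s0 := by
      apply String.toList_inj.mp
      rw [hsl, sliceLem t k Ln hLle', hdrop]
    refine List.mem_map.2 ⟨(Ln : Int), List.mem_filter.2 ⟨?_, ?_⟩, ?_⟩
    · rw [PySem.List.mem_sorted, PySem.Set.mem_ofList]
      exact List.mem_map.2 ⟨s0, List.mem_filter.2 ⟨hs0mem, by rw [decide_eq_true_eq]; exact hs0ne⟩,
        by rw [PySem.Str.len_eq]⟩
    · rw [decide_eq_true_eq]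
      exact ⟨by omega, (PySem.Set.contains_iff _ _).mpr ((PySem.Set.mem_ofList strs sl).mpr (hsleq ▸ hs0mem))⟩
    · rw [← hvx]
      by_cases hcase : Ln = k + 1
      · rw [if_pos (by exact_mod_cast hcase), if_pos hcase]
      · rw [if_neg (by exact_mod_cast hcase), if_neg hcase]
        congr 1
        rw [show ((k:Int) - (Ln:Int)) = (((k - Ln : Nat)):Int) by omega,
          PySem.List.pyGetD_natCast]

theorem outer (strs : List String) (t : String) (k : Nat) (hk : k ≤ t.toList.length) :
    ((PySem.List.pyRange 0 (k : Int) 1).foldl (fun dp i =>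
        strs.foldl (fun dp s =>
          if PySem.Str.endswith (PySem.Str.slice t (some 0) (some (i + 1))) s then
            PySem.List.pySetD dp i (min (PySem.List.pyGetD dp i 0)
              (if i - PySem.Str.len s < 0 then 1
               else PySem.List.pyGetD dp (i - PySem.Str.len s) 0 + 1))
          else dp) dp)
      (List.replicate t.toList.length 20002)
      = dpPre strs t.toList k ++ List.replicate (t.toList.length - k) 20002)
    ∧ ((PySem.List.pyRange 0 (k : Int) 1).foldl (fun dp i =>
        dp ++ [(PySem.List.sorted (PySem.Set.ofList ((strs.filter (fun s => s ≠ "")).map PySem.Str.len)) (fun x => x) false).foldl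
          (fun best L =>
            if L ≤ i + 1 ∧ (PySem.Set.ofList strs).contains
                  (PySem.Str.slice t (some (i + 1 - L)) (some (i + 1))) then
              min best (if L = i + 1 then 1 else PySem.List.pyGetD dp (i - L) 0 + 1)
            else best) 20002]) []
      = dpPre strs t.toList k) := by
  induction k with
  | zero =>
    refine ⟨?_, ?_⟩ <;>
      simp [dpPre]
  | succ k ih =>
    have hk' : k ≤ t.toList.length := by omega
    obtain ⟨ihA, ihB⟩ := ih hk'
    have hrange : PySem.List.pyRange 0 ((k+1 : Nat) : Int) 1 = PySem.List.pyRange 0 (k : Int) 1 ++ [(k : Int)] := by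
      rw [show (((k+1 : Nat)) : Int) = ((k : Int) + 1) by push_cast; ring]
      exact PySem.List.pyRange_one_succ_right (by omega)
    have hrep : List.replicate (t.toList.length - k) (20002 : Int)
        = 20002 :: List.replicate (t.toList.length - (k+1)) 20002 := by
      rw [show t.toList.length - k = (t.toList.length - (k+1)) + 1 by omega, List.replicate_succ]
    constructor
    · rw [hrange, List.foldl_append, ihA, hrep, List.foldl_cons, List.foldl_nil]
      rw [innerA strs t (dpPre strs t.toList k) (List.replicate (t.toList.length - (k+1)) 20002) 20002 k
        (length_dpPre strs t.toList k) (by omega)]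
      simp [dpPre]
    · rw [hrange, List.foldl_append, ihB, List.foldl_cons, List.foldl_nil]
      rw [innerB strs t (dpPre strs t.toList k) k (length_dpPre strs t.toList k) (by omega)]
      simp [dpPre]

-- ===== VERDICT (by name: the statement is the Claim_ definition above) =====
theorem solution_spec : Claim_equal_solution := by
  intro strs t _ hpre
  unfold Spec_solution solution solution_alt
  have hne : t.toList ≠ [] := fun h => hpre (String.toList_inj.mp (by simp [h]))
  have hn : 0 < t.toList.length := List.length_pos_iff.mpr hne
  have hA := (outer strs t t.toList.length le_rfl).1
  have hB := (outer strs t t.toList.length le_rfl).2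
  rw [show PySem.Str.len t = ((t.toList.length : Nat) : Int) from PySem.Str.len_eq t]
  simp only [Int.toNat_natCast]
  rw [hA, hB, Nat.sub_self, List.replicate_zero, List.append_nil]
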